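-- pv_equiv track=rewrite | github.com/jeastman/ecl-agent | services/policy_service/local_agent_policy_service/policy_engine.py | _extract_rm_targets
-- ===== SOURCE A (Python) =====
-- def _extract_rm_targets(arguments: list[str]) -> list[str]:
--     targets: list[str] = []
--     literal_mode = False
--     for argument in arguments:
--         if not argument:
--             continue
--         if literal_mode:
--             targets.append(argument)
--             continue
--         if argument == "--":
--             literal_mode = True
--             continue
--         if argument.startswith("-"):
--             continue
--         targets.append(argument)
--     return targets
-- ===== SOURCE B (Python) =====
-- def _extract_rm_targets(arguments: list[str]) -> list[str]:
--     if "--" in arguments: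
--         idx = arguments.index("--")
--         return [a for a in arguments[:idx] if a and not a.startswith("-")] + \
--                [a for a in arguments[idx + 1:] if a]
--     return [a for a in arguments if a and not a.startswith("-")]
-- ===== Notes on version B (the rewrite author's own statement) =====
-- stated objective: alternative
-- what changed: Replaces the single stateful loop with a literal_mode flag by an explicit split at the first '--' separator followed by two independently filtered comprehensions over the head and tail segments.
import Mathlib
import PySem

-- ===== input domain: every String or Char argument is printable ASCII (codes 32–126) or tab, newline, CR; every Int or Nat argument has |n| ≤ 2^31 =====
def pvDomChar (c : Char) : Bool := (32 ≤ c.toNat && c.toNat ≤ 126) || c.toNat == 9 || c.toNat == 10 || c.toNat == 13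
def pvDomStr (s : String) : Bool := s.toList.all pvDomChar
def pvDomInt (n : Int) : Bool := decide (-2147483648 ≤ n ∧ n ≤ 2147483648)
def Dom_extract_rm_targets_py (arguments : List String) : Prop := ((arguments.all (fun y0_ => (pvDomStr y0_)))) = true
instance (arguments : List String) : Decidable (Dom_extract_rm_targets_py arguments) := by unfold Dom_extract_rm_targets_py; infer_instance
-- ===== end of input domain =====

-- ===== PORT A =====
-- B rewrites A's single flag-carrying loop as a split at the first "--" plus two filtered passes (alternative decomposition, same cost).
def extract_rm_targets_py (arguments : List String) : List String :=
  (arguments.foldl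
    (fun (s : List String × Bool) argument =>
      if argument = "" then s
      else if s.2 then (s.1 ++ [argument], s.2)
      else if argument = "--" then (s.1, true)
      else if PySem.Str.startswith argument "-" then s
      else (s.1 ++ [argument], s.2))
    ([], false)).1

-- ===== PORT B =====
def extract_rm_targets_py_alt (arguments : List String) : List String :=
  match PySem.List.index? arguments "--" with
  | some idx =>
      ((arguments.take idx).filter (fun a => a ≠ "" && !(PySem.Str.startswith a "-")))
        ++ ((arguments.drop (idx + 1)).filter (fun a => a ≠ ""))
  | none => arguments.filter (fun a => a ≠ "" && !(PySem.Str.startswith a "-"))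

-- ===== PRECONDITION & SPEC =====
def Spec_extract_rm_targets_py (arguments : List String) (out : List String) : Prop := out = extract_rm_targets_py_alt arguments
instance (arguments : List String) (out : List String) : Decidable (Spec_extract_rm_targets_py arguments out) := by unfold Spec_extract_rm_targets_py; infer_instance

-- ===== CLAIM (what is proved, stated in full; the proofs are below) =====
def Claim_equal_extract_rm_targets_py : Prop := ∀ (arguments : List String), Dom_extract_rm_targets_py arguments → Spec_extract_rm_targets_py arguments (extract_rm_targets_py arguments)

-- ===== LEMMAS AND PROOFS =====

def pvStepA (s : List String × Bool) (argument : String) : List String × Bool :=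
  if argument = "" then s
  else if s.2 then (s.1 ++ [argument], s.2)
  else if argument = "--" then (s.1, true)
  else if PySem.Str.startswith argument "-" then s
  else (s.1 ++ [argument], s.2)

lemma pvFoldl_step (arguments : List String) (s : List String × Bool) :
    arguments.foldl
      (fun (s : List String × Bool) argument =>
        if argument = "" then s
        else if s.2 then (s.1 ++ [argument], s.2)
        else if argument = "--" then (s.1, true)
        else if PySem.Str.startswith argument "-" then s
        else (s.1 ++ [argument], s.2)) s
    = arguments.foldl pvStepA s := rfl

lemma pvFoldl_true (arguments : List String) (acc : List String) :
    arguments.foldl pvStepA (acc, true) = (acc ++ arguments.filter (fun a => a ≠ ""), true) := by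
  induction arguments generalizing acc with
  | nil => simp
  | cons a rest ih =>
    by_cases ha : a = "" <;> simp [pvStepA, ha, List.foldl_cons, ih]

lemma pvFoldl_false (arguments : List String) (acc : List String) :
    (arguments.foldl pvStepA (acc, false)).1 =
      acc ++ (match PySem.List.index? arguments "--" with
        | some idx =>
            ((arguments.take idx).filter (fun a => a ≠ "" && !(PySem.Str.startswith a "-")))
              ++ ((arguments.drop (idx + 1)).filter (fun a => a ≠ ""))
        | none => arguments.filter (fun a => a ≠ "" && !(PySem.Str.startswith a "-"))) := by
  induction arguments generalizing acc with
  | nil => simp [PySem.List.index?]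
  | cons a rest ih =>
    rw [List.foldl_cons]
    by_cases hsep : a = "--"
    · subst hsep
      have hstep : pvStepA (acc, false) "--" = (acc, true) := by simp [pvStepA]
      rw [hstep, PySem.List.index?_cons_self, pvFoldl_true]
      simp
    · rw [PySem.List.index?_cons_of_ne _ hsep]
      by_cases ha : a = ""
      · subst ha
        have hstep : pvStepA (acc, false) "" = (acc, false) := by simp [pvStepA]
        rw [hstep, ih]
        cases h : PySem.List.index? rest "--" <;> simp [h]
      · by_cases hdash : PySem.Str.startswith a "-"
        · have hstep : pvStepA (acc, false) a = (acc, false) := by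
            unfold pvStepA; split_ifs with h1 h2 h3 h4 <;> simp_all
          rw [hstep, ih]
          rw [PySem.Str.startswith_eq] at hdash
          have hdash2 : PySem.Chars.startswith a.toList [Char.ofNat 45] = true := hdash
          cases h : PySem.List.index? rest "--" <;> simp [h, ha, hdash2]
        · have hstep : pvStepA (acc, false) a = (acc ++ [a], false) := by
            unfold pvStepA; split_ifs with h1 h2 h3 h4 <;> simp_all
          rw [hstep, ih]
          rw [PySem.Str.startswith_eq] at hdash
          have hdash2 : ¬ PySem.Chars.startswith a.toList [Char.ofNat 45] = true := hdash
          cases h : PySem.List.index? rest "--" <;> simp [h, ha, hdash2]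

-- ===== VERDICT (by name: the statement is the Claim_ definition above) =====
theorem extract_rm_targets_py_spec : Claim_equal_extract_rm_targets_py := by
  intro arguments _
  unfold Spec_extract_rm_targets_py extract_rm_targets_py extract_rm_targets_py_alt
  rw [pvFoldl_step, pvFoldl_false]
  simp
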